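-- pv_equiv track=rewrite | github.com/anasuamitra/mvhre | src/sampler_paths.py | get_path_dict_and_length
-- ===== SOURCE A (Python) =====
-- def get_path_dict_and_length(rel2paths, null_relation, max_path_len):
--     path2id = {}
--     id2path = []
--     id2length = []
--     n_paths = 0
--     for path in rel2paths:
--         if path not in path2id:
--             path2id[path] = n_paths
--             id2length.append(len(path))
--             id2path.append(tuple(list(path) + [null_relation] * (max_path_len - len(path))))  # padding
--             n_paths += 1
--     return path2id, id2path, id2length
-- ===== SOURCE B (Python) =====
-- def get_path_dict_and_length(rel2paths, null_relation, max_path_len):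
--     # worklist algorithm: emit the head, then filter its duplicates out of the
--     # remaining work -- no seen-set / membership test is ever needed
--     path2id = {}
--     id2path = []
--     id2length = []
--     work = list(rel2paths)
--     i = 0
--     while work:
--         p = work[0]
--         path2id[p] = i
--         id2length.append(len(p))
--         id2path.append(tuple(p) + (null_relation,) * (max_path_len - len(p)))
--         work = [q for q in work[1:] if q != p]
--         i += 1
--     return path2id, id2path, id2length
-- ===== Notes on version B (the rewrite author's own statement) =====
-- stated objective: alternative
-- what changed: Replaces A's seen-dict membership test with a shrinking-worklist nub: repeatedly emit the head of the worklist and filter all its later duplicates out of the remaining work, so no membership lookup or seen structure exists.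
import Mathlib
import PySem

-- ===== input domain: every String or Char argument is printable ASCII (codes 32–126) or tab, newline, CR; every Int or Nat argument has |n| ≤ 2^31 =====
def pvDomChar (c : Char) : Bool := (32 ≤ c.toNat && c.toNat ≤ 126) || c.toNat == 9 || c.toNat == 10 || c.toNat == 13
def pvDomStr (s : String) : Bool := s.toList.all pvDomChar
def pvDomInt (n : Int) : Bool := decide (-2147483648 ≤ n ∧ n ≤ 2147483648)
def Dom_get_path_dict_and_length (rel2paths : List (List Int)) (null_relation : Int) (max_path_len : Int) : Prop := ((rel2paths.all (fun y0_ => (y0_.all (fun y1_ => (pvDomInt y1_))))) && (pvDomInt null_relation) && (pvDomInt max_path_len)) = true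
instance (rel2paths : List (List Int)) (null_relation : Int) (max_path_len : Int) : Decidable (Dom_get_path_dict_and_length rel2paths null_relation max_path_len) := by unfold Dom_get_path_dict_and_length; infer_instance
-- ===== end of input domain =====

-- B replaces A's seen-dict membership test by a shrinking-worklist nub (emit the head,
-- filter its duplicates out of the remaining work); objective: alternative.

-- ===== PORT A =====
-- literal transliteration of A's loop: state = (path2id, id2path, id2length, n_paths)
def get_path_dict_and_length (rel2paths : List (List Int)) (null_relation : Int) (max_path_len : Int) : (List (List Int × Int)) × List (List Int) × List Int :=
  let st := rel2paths.foldl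
    (fun (st : PySem.Dict (List Int) Int × List (List Int) × List Int × Int) path =>
      let (path2id, id2path, id2length, n_paths) := st
      if path2id.contains path then st
      else (path2id.insert path n_paths,
            id2path ++ [path ++ List.replicate (max_path_len - (path.length : Int)).toNat null_relation],
            id2length ++ [(path.length : Int)],
            n_paths + 1))
    (PySem.Dict.empty, [], [], 0)
  (st.1.items, st.2.1, st.2.2.1)

-- ===== PORT B =====
-- transliteration of Source B's while-loop: the worklist shrinks strictly each step
def pvAltLoop (null_relation max_path_len : Int)
    (path2id : PySem.Dict (List Int) Int) (id2path : List (List Int)) (id2length : List Int)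
    (i : Int) : List (List Int) → (List (List Int × Int)) × List (List Int) × List Int
  | [] => (path2id.items, id2path, id2length)
  | p :: t =>
      pvAltLoop null_relation max_path_len
        (path2id.insert p i)
        (id2path ++ [p ++ List.replicate (max_path_len - (p.length : Int)).toNat null_relation])
        (id2length ++ [(p.length : Int)])
        (i + 1)
        (t.filter (fun q => q ≠ p))
  termination_by work => work.length
  decreasing_by
    simp only [List.length_cons, List.length_unattach]
    exact Nat.lt_succ_of_le (le_trans (List.length_filter_le _ _) (by simp))

def get_path_dict_and_length_alt (rel2paths : List (List Int)) (null_relation : Int) (max_path_len : Int) : (List (List Int × Int)) × List (List Int) × List Int :=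
  pvAltLoop null_relation max_path_len PySem.Dict.empty [] [] 0 rel2paths

-- ===== PRECONDITION & SPEC =====
def Spec_get_path_dict_and_length (rel2paths : List (List Int)) (null_relation : Int) (max_path_len : Int) (out : (List (List Int × Int)) × List (List Int) × List Int) : Prop := out = get_path_dict_and_length_alt rel2paths null_relation max_path_len
instance (rel2paths : List (List Int)) (null_relation : Int) (max_path_len : Int) (out : (List (List Int × Int)) × List (List Int) × List Int) : Decidable (Spec_get_path_dict_and_length rel2paths null_relation max_path_len out) := by unfold Spec_get_path_dict_and_length; infer_instance

-- ===== CLAIM (what is proved, stated in full; the proofs are below) =====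
def Claim_equal_get_path_dict_and_length : Prop := ∀ (rel2paths : List (List Int)) (null_relation : Int) (max_path_len : Int), Dom_get_path_dict_and_length rel2paths null_relation max_path_len → Spec_get_path_dict_and_length rel2paths null_relation max_path_len (get_path_dict_and_length rel2paths null_relation max_path_len)

-- ===== LEMMAS AND PROOFS =====

-- the first occurrences in l of elements not already in seen (proof helper for A's loop)
def pvFresh (seen : List (List Int)) : List (List Int) → List (List Int)
  | [] => []
  | p :: t => if seen.contains p then pvFresh seen t else p :: pvFresh (seen ++ [p]) t

-- the filter-ahead nub (proof helper matching B's worklist shape)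
def pvNub : List (List Int) → List (List Int)
  | [] => []
  | p :: t => p :: pvNub (t.filter (fun q => q ≠ p))
  termination_by l => l.length
  decreasing_by
    simp only [List.length_cons, List.length_unattach]
    exact Nat.lt_succ_of_le (le_trans (List.length_filter_le _ _) (by simp))

theorem fresh_eq_nub_filter (t : List (List Int)) (s : List (List Int)) :
    pvFresh s t = pvNub (t.filter (fun q => !s.contains q)) := by
  induction t generalizing s with
  | nil => simp [pvFresh, pvNub]
  | cons p t ih =>
    by_cases h : p ∈ s
    · have hc : s.contains p = true := List.contains_iff_mem.mpr h
      simp [pvFresh, List.filter_cons, h, ih s]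
    · have hc : s.contains p = false := by
        rw [Bool.eq_false_iff]; intro hc'; exact h (List.contains_iff_mem.mp hc')
      have h1 : pvFresh s (p :: t) = p :: pvFresh (s ++ [p]) t := by
        simp [pvFresh, h]
      have h2 : (p :: t).filter (fun q => !s.contains q)
          = p :: t.filter (fun q => !s.contains q) := by
        simp [List.filter_cons, h]
      rw [h1, h2, pvNub, ih (s ++ [p]), List.filter_filter]
      have hfil : List.filter (fun q => !(s ++ [p]).contains q) t
          = List.filter (fun a => (!s.contains a) && decide (a ≠ p)) t := by
        apply List.filter_congr
        intro q _
        by_cases hq : q = p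
        · subst hq; simp
        · simp [List.contains_iff_mem, hq, Ne.symm hq]
      rw [hfil]
      simp [Bool.and_comm]

theorem fresh_nil_eq_nub (l : List (List Int)) : pvFresh [] l = pvNub l := by
  rw [fresh_eq_nub_filter]
  congr 1
  simpa using List.filter_true l

theorem foldA_eq (null_relation max_path_len : Int) (l : List (List Int))
    (d : PySem.Dict (List Int) Int) (i2p : List (List Int)) (i2l : List Int) (n : Int)
    (hnd : d.keys.Nodup) :
    l.foldl
      (fun (st : PySem.Dict (List Int) Int × List (List Int) × List Int × Int) path =>
        let (path2id, id2path, id2length, n_paths) := st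
        if path2id.contains path then st
        else (path2id.insert path n_paths,
              id2path ++ [path ++ List.replicate (max_path_len - (path.length : Int)).toNat null_relation],
              id2length ++ [(path.length : Int)],
              n_paths + 1))
      (d, i2p, i2l, n)
    = (PySem.Dict.mk (d.items ++ (PySem.List.enumerate (pvFresh d.keys l) n).map (fun ip => (ip.2, ip.1))),
       i2p ++ (pvFresh d.keys l).map (fun p => p ++ List.replicate (max_path_len - (p.length : Int)).toNat null_relation),
       i2l ++ (pvFresh d.keys l).map (fun p => (p.length : Int)),
       n + (pvFresh d.keys l).length) := by
  induction l generalizing d i2p i2l n with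
  | nil => simp [pvFresh]
  | cons p t ih =>
    simp only [List.foldl_cons, pvFresh]
    by_cases h : d.contains p = true
    · have hk : d.keys.contains p = true := by
        rw [List.contains_iff_mem]
        exact (PySem.Dict.contains_iff_mem_keys d p).mp h
      simp only [h, hk, if_true]
      exact ih d i2p i2l n hnd
    · have h' : d.contains p = false := by simpa using h
      have hk : d.keys.contains p = false := by
        rw [Bool.eq_false_iff]
        intro hc
        exact h ((PySem.Dict.contains_iff_mem_keys d p).mpr (List.contains_iff_mem.mp hc))
      simp only [h', hk, Bool.false_eq_true, if_false]
      rw [ih (d.insert p n) _ _ (n + 1) (PySem.Dict.nodup_keys_insert d p n hnd)]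
      rw [PySem.Dict.keys_insert_of_not_contains d n h',
          PySem.Dict.items_insert_of_not_contains d n h']
      simp only [PySem.List.enumerate_cons, List.map_cons, List.append_assoc,
        List.singleton_append, List.length_cons, Prod.mk.injEq]
      refine ⟨trivial, trivial, trivial, ?_⟩
      push_cast
      ring

theorem altLoop_eq (null_relation max_path_len : Int) (work : List (List Int))
    (d : PySem.Dict (List Int) Int) (i2p : List (List Int)) (i2l : List Int) (n : Int)
    (hfresh : ∀ q ∈ work, d.contains q = false) :
    pvAltLoop null_relation max_path_len d i2p i2l n work
      = (d.items ++ (PySem.List.enumerate (pvNub work) n).map (fun ip => (ip.2, ip.1)),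
         i2p ++ (pvNub work).map (fun p => p ++ List.replicate (max_path_len - (p.length : Int)).toNat null_relation),
         i2l ++ (pvNub work).map (fun p => (p.length : Int))) := by
  induction hw : work.length using Nat.strong_induction_on generalizing work d i2p i2l n with
  | _ m ih =>
    cases work with
    | nil => simp [pvAltLoop, pvNub]
    | cons p t =>
      have hp : d.contains p = false := hfresh p (by simp)
      rw [pvAltLoop, pvNub]
      rw [ih (t.filter (fun q => q ≠ p)).length
          (by subst hw; simp only [List.length_cons]
              exact Nat.lt_succ_of_le (List.length_filter_le _ _))
          _ _ _ _ _ ?_ rfl]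
      · rw [PySem.Dict.items_insert_of_not_contains d n hp]
        simp only [PySem.List.enumerate_cons, List.map_cons, List.append_assoc,
          List.singleton_append]
      · intro q hq
        have hq' := List.of_mem_filter hq
        have hqp : q ≠ p := by simpa using hq'
        have hqt : q ∈ t := List.mem_of_mem_filter hq
        have : d.contains q = false := hfresh q (by simp [hqt])
        rw [PySem.Dict.contains_insert]
        simp only [this]
        simpa using hqp

-- ===== VERDICT (by name: the statement is the Claim_ definition above) =====
theorem get_path_dict_and_length_spec : Claim_equal_get_path_dict_and_length := by
  intro rel2paths null_relation max_path_len _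
  show get_path_dict_and_length rel2paths null_relation max_path_len
      = get_path_dict_and_length_alt rel2paths null_relation max_path_len
  unfold get_path_dict_and_length get_path_dict_and_length_alt
  rw [foldA_eq null_relation max_path_len rel2paths PySem.Dict.empty [] [] 0 (by simp)]
  rw [altLoop_eq null_relation max_path_len rel2paths PySem.Dict.empty [] [] 0
      (by intro q _; simp [PySem.Dict.contains_empty])]
  have hk : (PySem.Dict.empty : PySem.Dict (List Int) Int).keys = [] := rfl
  rw [hk, fresh_nil_eq_nub]
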